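-- pv_equiv track=rewrite | github.com/eqan/Exam-Schedule-Generator-Using-Local-Search-Algorithms | program.py | setdate
-- ===== SOURCE A (Python) =====
-- import copy
--
-- def setdate(daylist, datelist):
--     dx = []
--     dl = copy.deepcopy(datelist)
--     count = 0
--     for i in range(len(dl)-1):
--         dx.append(dl[i] + count)
--         if daylist[i] == 'Friday' and daylist[i+1] != 'Friday':
--             count += 2
--         if i == len(dl)-2:
--             dx.append(dl[i] + count)
--     return dx
-- ===== SOURCE B (Python) =====
-- def setdate(daylist, datelist):
--     n = len(datelist)
--     offsets = []
--     count = 0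
--     for i in range(n - 1):
--         offsets.append(count)
--         if daylist[i] == 'Friday' and daylist[i + 1] != 'Friday':
--             count += 2
--     result = [datelist[i] + offsets[i] for i in range(n - 1)]
--     if n >= 2:
--         result.append(datelist[n - 2] + count)
--     return result
-- ===== Notes on version B (the rewrite author's own statement) =====
-- stated objective: alternative
-- what changed: B replaces A's single stateful loop with its in-loop last-iteration append by two passes: one building the list of accumulated offsets, then a mapping pass that adds dates to offsets, with the quirky final element (datelist[n-2] plus the post-update count) appended explicitly; the deepcopy is dropped.
import Mathlib
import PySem

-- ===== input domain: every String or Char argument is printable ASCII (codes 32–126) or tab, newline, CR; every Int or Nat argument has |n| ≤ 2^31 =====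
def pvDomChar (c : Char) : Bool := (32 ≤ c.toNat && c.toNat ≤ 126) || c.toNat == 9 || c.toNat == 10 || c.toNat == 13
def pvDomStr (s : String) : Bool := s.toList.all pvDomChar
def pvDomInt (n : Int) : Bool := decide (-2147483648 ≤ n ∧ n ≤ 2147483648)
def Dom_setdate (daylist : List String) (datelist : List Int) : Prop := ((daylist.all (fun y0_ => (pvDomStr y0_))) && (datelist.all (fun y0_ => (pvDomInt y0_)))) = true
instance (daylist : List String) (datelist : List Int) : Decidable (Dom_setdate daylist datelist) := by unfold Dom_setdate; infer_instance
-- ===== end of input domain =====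

-- B: two passes (build the offsets-prefix list, then map dates + offsets, appending the quirky
-- final element datelist[n-2]+final count explicitly) instead of A's single stateful loop with
-- an in-loop last-iteration append; no deepcopy. Alternative decomposition, same O(n) cost.


-- ===== PORT A =====
-- one loop step of A: append dl[i]+count, update count on a Friday boundary,
-- and at i == n-2 append dl[i] + (updated) count again
def aStep (daylist : List String) (datelist : List Int) (n : Int)
    (st : List Int × Int) (i : Int) : List Int × Int :=
  let dx := st.1 ++ [PySem.List.pyGetD datelist i 0 + st.2]
  let count := if PySem.List.pyGetD daylist i "" = "Friday" ∧
                  PySem.List.pyGetD daylist (i + 1) "" ≠ "Friday"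
               then st.2 + 2 else st.2
  let dx := if i = n - 2 then dx ++ [PySem.List.pyGetD datelist i 0 + count] else dx
  (dx, count)

def setdate (daylist : List String) (datelist : List Int) : List Int :=
  ((PySem.List.pyRange 0 ((datelist.length : Int) - 1) 1).foldl
      (aStep daylist datelist (datelist.length : Int)) ([], 0)).1

-- ===== PORT B =====
-- one step of B's first pass: append the current count to the offsets list, then update it
def bStep (daylist : List String) (st : List Int × Int) (i : Int) : List Int × Int :=
  (st.1 ++ [st.2],
   if PySem.List.pyGetD daylist i "" = "Friday" ∧
      PySem.List.pyGetD daylist (i + 1) "" ≠ "Friday"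
   then st.2 + 2 else st.2)

-- B's first pass: the (offsets, count) pair after the loop over range(n-1)
def bOffsets (daylist : List String) (n : Int) : List Int × Int :=
  (PySem.List.pyRange 0 (n - 1) 1).foldl (bStep daylist) ([], 0)

def setdate_alt (daylist : List String) (datelist : List Int) : List Int :=
  (PySem.List.pyRange 0 ((datelist.length : Int) - 1) 1).map
    (fun i => PySem.List.pyGetD datelist i 0 +
      PySem.List.pyGetD (bOffsets daylist (datelist.length : Int)).1 i 0)
  ++ (if 2 ≤ (datelist.length : Int) then
        [PySem.List.pyGetD datelist ((datelist.length : Int) - 2) 0 +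
         (bOffsets daylist (datelist.length : Int)).2]
      else [])

-- ===== PRECONDITION & SPEC =====
-- Pre_ excludes exactly the inputs on which the Python A raises IndexError: daylist shorter than
-- the indices the loop reads (mind the short-circuit: daylist[i+1] is only read when
-- daylist[i] == 'Friday', so length n-1 is fine unless daylist[n-2] == 'Friday').
def Pre_setdate (daylist : List String) (datelist : List Int) : Prop :=
  datelist.length ≤ 1 ∨ datelist.length ≤ daylist.length ∨
  (datelist.length = daylist.length + 1 ∧
   PySem.List.pyGetD daylist ((datelist.length : Int) - 2) "" ≠ "Friday")
instance (daylist : List String) (datelist : List Int) : Decidable (Pre_setdate daylist datelist) := by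
  unfold Pre_setdate; infer_instance

def pvWitness_setdate : List String × List Int :=
  (["Friday", "Monday", "Friday"], [10, 11, 12])

def Spec_setdate (daylist : List String) (datelist : List Int) (out : List Int) : Prop := out = setdate_alt daylist datelist
instance (daylist : List String) (datelist : List Int) (out : List Int) : Decidable (Spec_setdate daylist datelist out) := by unfold Spec_setdate; infer_instance

-- ===== CLAIM (what is proved, stated in full; the proofs are below) =====
def Claim_equal_setdate : Prop := ∀ (daylist : List String) (datelist : List Int), Dom_setdate daylist datelist → Pre_setdate daylist datelist → Spec_setdate daylist datelist (setdate daylist datelist)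

-- ===== LEMMAS AND PROOFS =====

-- the accumulated count after k loop iterations
def cnt (daylist : List String) : Nat → Int
  | 0 => 0
  | k + 1 =>
    if PySem.List.pyGetD daylist (k : Int) "" = "Friday" ∧
       PySem.List.pyGetD daylist ((k : Int) + 1) "" ≠ "Friday"
    then cnt daylist k + 2 else cnt daylist k

lemma bFold (daylist : List String) (k : Nat) :
    (PySem.List.pyRange 0 (k : Int) 1).foldl (bStep daylist) ([], 0)
      = ((List.range k).map (cnt daylist), cnt daylist k) := by
  induction k with
  | zero => simp [PySem.List.pyRange_one_eq_nil, cnt]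
  | succ k ih =>
    have hc : ((k + 1 : Nat) : Int) = (k : Int) + 1 := by push_cast; ring
    rw [hc, PySem.List.pyRange_one_succ_right (by positivity)]
    rw [List.foldl_append, ih]
    simp [bStep, List.range_succ, cnt]

lemma aFold (daylist : List String) (datelist : List Int) (n : Int) (k : Nat)
    (hk : (k : Int) ≤ n - 2) :
    (PySem.List.pyRange 0 (k : Int) 1).foldl (aStep daylist datelist n) ([], 0)
      = ((List.range k).map
           (fun (j : Nat) => PySem.List.pyGetD datelist (j : Int) 0 + cnt daylist j),
         cnt daylist k) := by
  induction k with
  | zero => simp [PySem.List.pyRange_one_eq_nil, cnt]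
  | succ k ih =>
    have hc : ((k + 1 : Nat) : Int) = (k : Int) + 1 := by push_cast; ring
    rw [hc, PySem.List.pyRange_one_succ_right (by positivity)]
    rw [List.foldl_append, ih (by push_cast at hk ⊢; omega)]
    have hne : (k : Int) ≠ n - 2 := by push_cast at hk; omega
    simp [aStep, hne, List.range_succ, cnt]

theorem setdate_eq (daylist : List String) (datelist : List Int) :
    setdate daylist datelist = setdate_alt daylist datelist := by
  unfold setdate setdate_alt bOffsets
  by_cases h2 : 2 ≤ (datelist.length : Int)
  case neg =>
    rw [PySem.List.pyRange_one_eq_nil (by omega), if_neg h2]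
    simp
  case pos =>
    set L : Nat := datelist.length with hLdef
    set M : Nat := L - 1 with hMdef
    have hM1 : 1 ≤ M := by omega
    have hn1 : (L : Int) - 1 = ((M : Nat) : Int) := by omega
    have hn2 : (L : Int) - 2 = ((M - 1 : Nat) : Int) := by omega
    rw [hn1]
    -- split the A-range at M-1 (the index where the extra append fires)
    have hsplit : PySem.List.pyRange 0 (M : Int) 1
        = PySem.List.pyRange 0 ((M - 1 : Nat) : Int) 1 ++ [((M - 1 : Nat) : Int)] := by
      have h : (M : Int) = ((M - 1 : Nat) : Int) + 1 := by omega
      rw [h, PySem.List.pyRange_one_succ_right (by positivity)]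
    conv_lhs => rw [hsplit, List.foldl_append,
      aFold daylist datelist (L : Int) (M - 1) (by omega)]
    rw [bFold, if_pos h2]
    have hi : ((M - 1 : Nat) : Int) = (L : Int) - 2 := hn2.symm
    -- B's map equals A's map since offsets[j] = cnt j for j < M
    have hmap : (PySem.List.pyRange 0 (M : Int) 1).map
        (fun i => PySem.List.pyGetD datelist i 0 +
          PySem.List.pyGetD ((List.range M).map (cnt daylist)) i 0)
        = (List.range M).map
            (fun (j : Nat) => PySem.List.pyGetD datelist (j : Int) 0 + cnt daylist j) := by
      rw [PySem.List.pyRange_one]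
      simp only [sub_zero, Int.toNat_natCast, List.map_map]
      refine List.map_congr_left (fun j hj => ?_)
      have hjM : j < M := List.mem_range.mp hj
      simp [PySem.List.pyGetD_natCast, List.getD_eq_getElem?_getD, hjM, zero_add]
    rw [hmap]
    -- both sides: map over range (M-1) ++ [entry at M-1] ++ [tail]
    have hMs : M = (M - 1) + 1 := by omega
    have hrange : (List.range M).map
        (fun (j : Nat) => PySem.List.pyGetD datelist (j : Int) 0 + cnt daylist j)
        = (List.range (M - 1)).map
            (fun (j : Nat) => PySem.List.pyGetD datelist (j : Int) 0 + cnt daylist j)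
          ++ [PySem.List.pyGetD datelist ((M - 1 : Nat) : Int) 0 + cnt daylist (M - 1)] := by
      conv_lhs => rw [hMs, List.range_succ]
      simp
    rw [hrange]
    -- final count: cnt M unfolds with the step condition at M-1
    have hcnt : cnt daylist M =
        if PySem.List.pyGetD daylist ((M - 1 : Nat) : Int) "" = "Friday" ∧
           PySem.List.pyGetD daylist (((M - 1 : Nat) : Int) + 1) "" ≠ "Friday"
        then cnt daylist (M - 1) + 2 else cnt daylist (M - 1) := by
      conv_lhs => rw [hMs]
      simp [cnt]
    rw [hcnt]
    -- last A step: i = M-1 equals n-2, so the extra append fires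
    simp [aStep, hi]

-- ===== VERDICT (by name: the statement is the Claim_ definition above) =====
theorem setdate_spec : Claim_equal_setdate := by
  intro daylist datelist _ _
  unfold Spec_setdate
  exact setdate_eq daylist datelist
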